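-- pv_equiv track=rewrite | github.com/Pablogb29/hitster | backend/main.py | _compute_insert_position
-- ===== SOURCE A (Python) =====
-- from typing import Literal, Optional
--
-- def _compute_insert_position(timeline: list[dict], track: dict, tie_policy: str) -> tuple[int, Optional[tuple[int, int]]]:
--     """
--     Year-only validation: Find the correct insertion position based on year only.
--     Equal years are treated as the same position (order within the same year is free).
--     """
--     # Extract years from timeline
--     years = []
--     for card in timeline:
--         date = card.get("release", {}).get("date", "")
--         year = int(date.split("-")[0]) if date and date.split("-")[0].isdigit() else 0
--         years.append(year)
--
--     # Extract target year
--     target_date = track.get("release", {}).get("date", "")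
--     target_year = int(target_date.split("-")[0]) if target_date and target_date.split("-")[0].isdigit() else 0
--
--     if not years:
--         return (0, (0, 0) if tie_policy == "lenient" else None)
--
--     # Find insertion point using year-only comparison
--     lo = 0
--     hi = len(years)
--     while lo < hi:
--         mid = (lo + hi) // 2
--         if years[mid] < target_year:
--             lo = mid + 1
--         else:
--             hi = mid
--
--     if tie_policy == "strict":
--         return (lo, None)
--
--     # For lenient policy, find the range of positions with the same year
--     left = lo
--     right = lo
--     while left - 1 >= 0 and years[left - 1] == target_year:
--         left -= 1
--     while right < len(years) and years[right] == target_year: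
--         right += 1
--
--     return (lo, (left, right))
-- ===== SOURCE B (Python) =====
-- from typing import Optional
--
--
-- def _compute_insert_position(timeline: list[dict], track: dict, tie_policy: str) -> tuple[int, Optional[tuple[int, int]]]:
--     """Single counting pass: with the timeline's years non-decreasing, the
--     insertion point is the number of strictly smaller years and the tie
--     range is [that count, the number of years <= the target]."""
--
--     def year_of(card: dict) -> int:
--         head = card.get("release", {}).get("date", "").split("-")[0]
--         return int(head) if head.isdigit() else 0
--
--     if not timeline:
--         return (0, (0, 0) if tie_policy == "lenient" else None)
--
--     target = year_of(track)
--     lo = hi = 0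
--     for card in timeline:
--         y = year_of(card)
--         if y < target:
--             lo += 1
--         if y <= target:
--             hi += 1
--
--     if tie_policy == "strict":
--         return (lo, None)
--     return (lo, (lo, hi))
-- ===== Notes on version B (the rewrite author's own statement) =====
-- stated objective: simpler
-- what changed: B replaces A's binary search plus two tie-run scans by one counting fold: on a year-sorted timeline the insertion point is the number of strictly smaller years and the tie range is [that count, count of years <= target].
import Mathlib
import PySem

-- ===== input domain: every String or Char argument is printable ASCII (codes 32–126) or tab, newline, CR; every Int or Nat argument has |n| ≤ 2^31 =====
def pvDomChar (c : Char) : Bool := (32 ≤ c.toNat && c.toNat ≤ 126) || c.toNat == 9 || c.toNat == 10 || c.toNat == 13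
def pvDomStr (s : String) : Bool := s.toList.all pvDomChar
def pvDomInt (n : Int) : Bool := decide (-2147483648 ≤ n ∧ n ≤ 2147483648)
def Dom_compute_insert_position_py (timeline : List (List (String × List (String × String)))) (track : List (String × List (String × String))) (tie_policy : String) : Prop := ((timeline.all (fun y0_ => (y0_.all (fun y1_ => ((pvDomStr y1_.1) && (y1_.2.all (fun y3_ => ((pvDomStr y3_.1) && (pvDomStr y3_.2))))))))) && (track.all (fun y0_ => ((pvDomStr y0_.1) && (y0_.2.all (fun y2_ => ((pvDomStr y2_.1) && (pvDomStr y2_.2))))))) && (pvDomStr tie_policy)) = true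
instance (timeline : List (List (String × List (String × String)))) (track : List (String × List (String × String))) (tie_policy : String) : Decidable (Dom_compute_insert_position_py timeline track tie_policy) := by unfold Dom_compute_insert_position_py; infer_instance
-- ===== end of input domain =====

-- B replaces A's binary search + tie-run scans by a single counting pass, correct because the timeline's years are non-decreasing (Pre_); objective: simpler.


-- ===== PORT A =====
-- year = int(date.split("-")[0]) if date and date.split("-")[0].isdigit() else 0
def pvYearOfA (card : List (String × List (String × String))) : Int :=
  let date := (PySem.Dict.mk ((PySem.Dict.mk card).getD "release" [])).getD "date" ""
  let head := ((PySem.Str.split? date "-").getD []).headD ""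
  if date ≠ "" ∧ PySem.Str.strIsdigit head then (PySem.Int.ofStr? head).getD 0 else 0

-- while lo < hi: … — fuel-counted loop (fuel = len(years) ≥ the iteration count; a totality guard only)
def pvBisectA (years : List Int) (target : Int) : Nat → Int → Int → Int
  | 0, lo, _ => lo
  | fuel + 1, lo, hi =>
    if lo < hi then
      let mid := PySem.Int.floordiv (lo + hi) 2
      if (PySem.List.pyGet? years mid).getD 0 < target then pvBisectA years target fuel (mid + 1) hi
      else pvBisectA years target fuel lo mid
    else lo

-- while left - 1 >= 0 and years[left - 1] == target_year: left -= 1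
def pvLeftA (years : List Int) (target : Int) : Nat → Int → Int
  | 0, left => left
  | fuel + 1, left =>
    if left - 1 ≥ 0 ∧ (PySem.List.pyGet? years (left - 1)).getD 0 = target then
      pvLeftA years target fuel (left - 1)
    else left

-- while right < len(years) and years[right] == target_year: right += 1
def pvRightA (years : List Int) (target : Int) : Nat → Int → Int
  | 0, right => right
  | fuel + 1, right =>
    if right < (years.length : Int) ∧ (PySem.List.pyGet? years right).getD 0 = target then
      pvRightA years target fuel (right + 1)
    else right

def compute_insert_position_py (timeline : List (List (String × List (String × String)))) (track : List (String × List (String × String))) (tie_policy : String) : Int × (Option (Int × Int)) :=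
  let years := timeline.foldl (fun acc card => acc ++ [pvYearOfA card]) []
  let target_year := pvYearOfA track
  if years = [] then (0, if tie_policy = "lenient" then some (0, 0) else none)
  else
    let lo := pvBisectA years target_year years.length 0 (years.length : Int)
    if tie_policy = "strict" then (lo, none)
    else
      let left := pvLeftA years target_year years.length lo
      let right := pvRightA years target_year years.length lo
      (lo, some (left, right))

-- ===== PORT B =====
-- head = card.get("release", {}).get("date", "").split("-")[0]; int(head) if head.isdigit() else 0
def pvYearOfB (card : List (String × List (String × String))) : Int :=
  let head := ((PySem.Str.split? ((PySem.Dict.mk ((PySem.Dict.mk card).getD "release" [])).getD "date" "") "-").getD []).headD ""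
  if PySem.Str.strIsdigit head then (PySem.Int.ofStr? head).getD 0 else 0

-- for card in timeline: y = year_of(card); if y < target: lo += 1; if y <= target: hi += 1
def compute_insert_position_py_alt (timeline : List (List (String × List (String × String)))) (track : List (String × List (String × String))) (tie_policy : String) : Int × (Option (Int × Int)) :=
  if timeline = [] then (0, if tie_policy = "lenient" then some (0, 0) else none)
  else
    let target := pvYearOfB track
    let p := timeline.foldl (fun (acc : Int × Int) card =>
        let y := pvYearOfB card
        ((if y < target then acc.1 + 1 else acc.1), (if y ≤ target then acc.2 + 1 else acc.2))) (0, 0)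
    if tie_policy = "strict" then (p.1, none) else (p.1, some (p.1, p.2))

-- ===== PRECONDITION & SPEC =====
-- year extraction as Pre_ states it (a standalone copy; Pre_ must not reference the ports)
def pvPreYear (card : List (String × List (String × String))) : Int :=
  let head := ((PySem.Str.split? ((PySem.Dict.mk ((PySem.Dict.mk card).getD "release" [])).getD "date" "") "-").getD []).headD ""
  if PySem.Str.strIsdigit head then (PySem.Int.ofStr? head).getD 0 else 0

-- Pre_ excludes timelines whose extracted years are not in non-decreasing order: the function's
-- purpose is bisection into a year-sorted timeline, and A's bisect result on an unsorted list is an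
-- accident of probe order that neither value specifies (A still returns a value there).
def Pre_compute_insert_position_py (timeline : List (List (String × List (String × String)))) (track : List (String × List (String × String))) (tie_policy : String) : Prop :=
  List.Pairwise (· ≤ ·) (timeline.map pvPreYear)
instance (timeline : List (List (String × List (String × String)))) (track : List (String × List (String × String))) (tie_policy : String) : Decidable (Pre_compute_insert_position_py timeline track tie_policy) := by unfold Pre_compute_insert_position_py; infer_instance

def pvWitness_compute_insert_position_py : (List (List (String × List (String × String)))) × (List (String × List (String × String))) × String :=
  ([[("release", [("date", "1990-01-01")])], [("release", [("date", "2001")])]], [("release", [("date", "1995")])], "lenient")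

def Spec_compute_insert_position_py (timeline : List (List (String × List (String × String)))) (track : List (String × List (String × String))) (tie_policy : String) (out : Int × (Option (Int × Int))) : Prop := out = compute_insert_position_py_alt timeline track tie_policy
instance (timeline : List (List (String × List (String × String)))) (track : List (String × List (String × String))) (tie_policy : String) (out : Int × (Option (Int × Int))) : Decidable (Spec_compute_insert_position_py timeline track tie_policy out) := by unfold Spec_compute_insert_position_py; infer_instance

-- ===== CLAIM =====
def Claim_equal_compute_insert_position_py : Prop := ∀ (timeline : List (List (String × List (String × String)))) (track : List (String × List (String × String))) (tie_policy : String), Dom_compute_insert_position_py timeline track tie_policy → Pre_compute_insert_position_py timeline track tie_policy → Spec_compute_insert_position_py timeline track tie_policy (compute_insert_position_py timeline track tie_policy)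

-- ===== LEMMAS AND PROOFS =====

-- A's two-sided guard equals B's single isdigit test: an empty date splits to [""] and "".isdigit() is False
theorem pvYearOf_eq (card : List (String × List (String × String))) : pvYearOfA card = pvYearOfB card := by
  unfold pvYearOfA pvYearOfB
  by_cases hd : (PySem.Dict.mk ((PySem.Dict.mk card).getD "release" [])).getD "date" "" = ""
  · rw [hd]; decide
  · simp [hd]

theorem pvYears_eq_map (timeline : List (List (String × List (String × String)))) :
    timeline.foldl (fun acc card => acc ++ [pvYearOfA card]) [] = timeline.map pvYearOfA := by
  simpa using PySem.List.foldl_append_singleton_eq_map pvYearOfA timeline []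

-- On a sorted list, a downward-closed predicate holds exactly on the first (filter count) positions
theorem pvCountChar (p : Int → Bool) (hp : ∀ a b : Int, a ≤ b → p b = true → p a = true) :
    ∀ (ys : List Int), List.Pairwise (· ≤ ·) ys → ∀ (i : Nat) (h : i < ys.length),
      (p ys[i] = true ↔ i < (ys.filter p).length) := by
  intro ys
  induction ys with
  | nil => intro _ i h; simp at h
  | cons x l ih =>
    intro hs i h
    rw [List.pairwise_cons] at hs
    by_cases hx : p x = true
    · rw [List.filter_cons_of_pos hx]
      cases i with
      | zero => simpa using hx
      | succ j =>
        have := ih hs.2 j (by simpa using h)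
        simpa [Nat.succ_lt_succ_iff] using this
    · have hall : ∀ y ∈ l, ¬ p y = true := fun y hy hpy => hx (hp x y (hs.1 y hy) hpy)
      have hfe : (x :: l).filter p = [] := by
        rw [List.filter_eq_nil_iff]
        intro y hy
        rcases List.mem_cons.mp hy with h1 | h2
        · subst h1; simpa using hx
        · simpa using hall y h2
      rw [hfe]
      simp only [List.length_nil]
      constructor
      · intro hp'
        exfalso
        cases i with
        | zero => exact hx hp'
        | succ j =>
          have hj : j < l.length := by simpa using h
          rw [List.getElem_cons_succ] at hp'
          exact hall l[j] (List.getElem_mem hj) hp'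
      · omega

-- A's binary search on a sorted list lands on the count of strictly smaller elements
theorem pvBisect_count (ys : List Int) (t c : Int)
    (H : ∀ i : Int, 0 ≤ i → i < (ys.length : Int) → ((PySem.List.pyGet? ys i).getD 0 < t ↔ i < c)) :
    ∀ (fuel : Nat) (lo hi : Int), 0 ≤ lo → lo ≤ c → c ≤ hi → hi ≤ (ys.length : Int) →
      hi - lo ≤ (fuel : Int) → pvBisectA ys t fuel lo hi = c := by
  intro fuel
  induction fuel with
  | zero => intro lo hi h0 h1 h2 h3 h4; rw [pvBisectA]; omega
  | succ fuel ih =>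
    intro lo hi h0 h1 h2 h3 h4
    rw [pvBisectA]
    by_cases h : lo < hi
    · have hm := PySem.Int.floordiv_two_mid_bounds (le_of_lt h)
      have h2' : PySem.Int.floordiv (lo + hi) 2 < hi := by
        rw [PySem.Int.floordiv_lt_iff_lt_mul (by omega)]; omega
      rw [if_pos h]
      simp only []
      have hhm := H (PySem.Int.floordiv (lo + hi) 2) (by omega) (by omega)
      split_ifs with hc
      · have hcc := hhm.mp hc
        exact ih _ hi (by omega) (by omega) h2 h3 (by push_cast at h4 ⊢; omega)
      · have hcc : ¬ PySem.Int.floordiv (lo + hi) 2 < c := fun hlt => hc (hhm.mpr hlt)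
        exact ih lo _ h0 h1 (by omega) (by omega) (by push_cast at h4 ⊢; omega)
    · rw [if_neg h]; omega

-- the left tie-scan never moves from the count of strictly smaller elements
theorem pvLeft_stop (ys : List Int) (t c : Int) (fuel : Nat) (h0 : 0 ≤ c)
    (hne : 0 < c → (PySem.List.pyGet? ys (c - 1)).getD 0 ≠ t) :
    pvLeftA ys t (fuel + 1) c = c := by
  rw [pvLeftA]
  by_cases hc : 0 < c
  · rw [if_neg (fun hg => hne hc hg.2)]
  · rw [if_neg (fun hg => by omega)]

-- the right tie-scan walks from c to d (the count of elements ≤ t)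
theorem pvRight_run (ys : List Int) (t c d : Int) (hdn : d ≤ (ys.length : Int))
    (Hmid : ∀ i : Int, c ≤ i → i < d → (PySem.List.pyGet? ys i).getD 0 = t)
    (Hstop : d < (ys.length : Int) → (PySem.List.pyGet? ys d).getD 0 ≠ t) :
    ∀ (fuel : Nat) (r : Int), c ≤ r → r ≤ d → d - r ≤ (fuel : Int) → pvRightA ys t fuel r = d := by
  intro fuel
  induction fuel with
  | zero => intro r h1 h2 h3; rw [pvRightA]; omega
  | succ fuel ih =>
    intro r h1 h2 h3
    rw [pvRightA]
    by_cases hr : r < d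
    · rw [if_pos ⟨by omega, Hmid r h1 hr⟩]
      exact ih (r + 1) (by omega) (by omega) (by push_cast at h3 ⊢; omega)
    · have hrd : r = d := by omega
      subst hrd
      by_cases hn : r < (ys.length : Int)
      · rw [if_neg (fun hg => Hstop hn hg.2)]
      · rw [if_neg (fun hg => hn hg.1)]

-- B's counting fold computes both filter counts
theorem pvFold_count (t : Int) :
    ∀ (tl : List (List (String × List (String × String)))) (a b : Int),
      tl.foldl (fun (acc : Int × Int) card =>
          let y := pvYearOfB card
          ((if y < t then acc.1 + 1 else acc.1), (if y ≤ t then acc.2 + 1 else acc.2))) (a, b)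
        = (a + (((tl.map pvYearOfB).filter (fun y => decide (y < t))).length : Int),
           b + (((tl.map pvYearOfB).filter (fun y => decide (y ≤ t))).length : Int)) := by
  intro tl
  induction tl with
  | nil => intro a b; simp
  | cons x l ih =>
    intro a b
    simp only [List.foldl_cons, List.map_cons, List.filter_cons]
    rw [ih]
    by_cases h1 : pvYearOfB x < t <;> by_cases h2 : pvYearOfB x ≤ t
    · simp only [h1, h2, if_pos, decide_true, List.length_cons, Prod.mk.injEq]
      constructor <;> push_cast <;> ring
    · exact absurd (le_of_lt h1) h2
    · simp only [h1, h2, if_pos, decide_false, decide_true, ite_false,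
        List.length_cons, Prod.mk.injEq]
      constructor <;> push_cast <;> ring
    · simp only [h1, h2, decide_false, ite_false, Prod.mk.injEq]
      constructor <;> push_cast <;> ring

-- ===== VERDICT (by name: the statement is the Claim_ definition above) =====
theorem compute_insert_position_py_spec : Claim_equal_compute_insert_position_py := by
  intro timeline track tie_policy _ hpre
  unfold Spec_compute_insert_position_py compute_insert_position_py compute_insert_position_py_alt
  rw [pvYears_eq_map, pvYearOf_eq]
  have hmap : timeline.map pvYearOfA = timeline.map pvYearOfB :=
    List.map_congr_left (fun card _ => pvYearOf_eq card)
  rw [hmap]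
  by_cases hnil : timeline = []
  · subst hnil; simp
  · have hfold := pvFold_count (pvYearOfB track) timeline 0 0
    obtain ⟨ys, hys⟩ : ∃ ys, timeline.map pvYearOfB = ys := ⟨_, rfl⟩
    have hpair : List.Pairwise (· ≤ ·) ys := hys ▸ hpre
    have hmapne : ys ≠ [] := by rw [← hys]; simpa using hnil
    rw [hys] at hfold ⊢
    obtain ⟨t, ht⟩ : ∃ t, pvYearOfB track = t := ⟨_, rfl⟩
    rw [ht] at hfold ⊢
    obtain ⟨cN, hcN⟩ : ∃ cN, (ys.filter (fun y => decide (y < t))).length = cN := ⟨_, rfl⟩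
    obtain ⟨dN, hdN⟩ : ∃ dN, (ys.filter (fun y => decide (y ≤ t))).length = dN := ⟨_, rfl⟩
    rw [hcN, hdN] at hfold
    have hcn : cN ≤ ys.length := hcN ▸ List.length_filter_le _ _
    have hdn : dN ≤ ys.length := hdN ▸ List.length_filter_le _ _
    have Hc : ∀ i : Int, 0 ≤ i → i < (ys.length : Int) →
        ((PySem.List.pyGet? ys i).getD 0 < t ↔ i < (cN : Int)) := by
      intro i hi0 hi1
      rw [PySem.List.pyGet?_eq_some_getElem ys hi0 hi1]
      simp only [Option.getD_some]
      have := pvCountChar (fun y => decide (y < t)) (by intro a b hab hb; simp at hb ⊢; omega)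
        ys hpair i.toNat (by omega)
      rw [hcN] at this
      simp only [decide_eq_true_eq] at this
      rw [this]; omega
    have Hd : ∀ i : Int, 0 ≤ i → i < (ys.length : Int) →
        ((PySem.List.pyGet? ys i).getD 0 ≤ t ↔ i < (dN : Int)) := by
      intro i hi0 hi1
      rw [PySem.List.pyGet?_eq_some_getElem ys hi0 hi1]
      simp only [Option.getD_some]
      have := pvCountChar (fun y => decide (y ≤ t)) (by intro a b hab hb; simp at hb ⊢; omega)
        ys hpair i.toNat (by omega)
      rw [hdN] at this
      simp only [decide_eq_true_eq] at this
      rw [this]; omega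
    have hcd : (cN : Int) ≤ (dN : Int) := by
      by_contra hlt
      have hd' : (dN : Int) < (ys.length : Int) := by omega
      have h1 := (Hc (dN : Int) (by omega) hd').mpr (by omega)
      have h2 := (Hd (dN : Int) (by omega) hd').mp (by omega)
      omega
    have hlo : pvBisectA ys t ys.length 0 (ys.length : Int) = (cN : Int) :=
      pvBisect_count ys t (cN : Int) Hc ys.length 0 (ys.length : Int)
        (by omega) (by omega) (by omega) (by omega) (by omega)
    obtain ⟨m, hm⟩ : ∃ m, ys.length = m + 1 := by
      cases ys with
      | nil => exact absurd rfl hmapne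
      | cons a l => exact ⟨l.length, rfl⟩
    have hleft : pvLeftA ys t ys.length (cN : Int) = (cN : Int) := by
      rw [hm]
      refine pvLeft_stop ys t (cN : Int) m (by omega) ?_
      intro hc0 hgt
      have := (Hc ((cN : Int) - 1) (by omega) (by omega)).mpr (by omega)
      omega
    have hright : pvRightA ys t ys.length (cN : Int) = (dN : Int) := by
      refine pvRight_run ys t (cN : Int) (dN : Int) (by omega) ?_ ?_ ys.length (cN : Int)
        (by omega) hcd (by omega)
      · intro i hi1 hi2
        have ha := (Hd i (by omega) (by omega)).mpr (by omega)
        have hb : ¬ (PySem.List.pyGet? ys i).getD 0 < t := fun hlt =>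
          absurd ((Hc i (by omega) (by omega)).mp hlt) (by omega)
        omega
      · intro hdlt hgt
        have := (Hd (dN : Int) (by omega) hdlt).mp (by omega)
        omega
    simp only [if_neg hmapne, if_neg hnil, hfold, hlo, hleft, hright]
    by_cases hstrict : tie_policy = "strict"
    · simp [hstrict]
    · simp [hstrict]
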